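-- pv_equiv track=rewrite | github.com/danieluxury88/DrupalAnalyzerBot | drupal/commerce_analyzer.py | categorize_and_sort_commerce_product_files
-- ===== SOURCE A (Python) =====
-- from collections import defaultdict
--
-- def categorize_and_sort_commerce_product_files(files):
--     """
--     Categorize and sort commerce_product files by the second segment of their filenames.
--
--     Args:
--         files (list of str): List of filenames starting with 'commerce_product'.
--
--     Returns:
--         dict: Dictionary where keys are categories derived from the second segment and values are sorted lists of filenames.
--     """
--     file_groups = defaultdict(list)
--     for file_name in files:
--         parts = file_name.split('.')
--         if len(parts) > 1:
--             category = parts[1]  # Extract the second segment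
--             file_groups[category].append(file_name)
--
--     # Sort files in each category
--     for category in file_groups:
--         file_groups[category].sort()
--
--     return dict(file_groups)
-- ===== SOURCE B (Python) =====
-- def categorize_and_sort_commerce_product_files(files):
--     """Sort once globally, then fill groups in one pass over the sorted list
--     (keys registered first, in original order, so dict key order matches)."""
--     groups = {}
--     for name in files:
--         parts = name.split('.')
--         if len(parts) > 1:
--             groups.setdefault(parts[1], [])
--     for name in sorted(files):
--         parts = name.split('.')
--         if len(parts) > 1:
--             groups[parts[1]].append(name)
--     return groups
-- ===== Notes on version B (the rewrite author's own statement) =====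
-- stated objective: alternative
-- what changed: Replaces the per-group in-place sorts with one global sort of the input followed by a single grouping pass over the sorted list (a first pass registers keys in original order, so no per-bucket sort is ever performed).
import Mathlib
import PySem

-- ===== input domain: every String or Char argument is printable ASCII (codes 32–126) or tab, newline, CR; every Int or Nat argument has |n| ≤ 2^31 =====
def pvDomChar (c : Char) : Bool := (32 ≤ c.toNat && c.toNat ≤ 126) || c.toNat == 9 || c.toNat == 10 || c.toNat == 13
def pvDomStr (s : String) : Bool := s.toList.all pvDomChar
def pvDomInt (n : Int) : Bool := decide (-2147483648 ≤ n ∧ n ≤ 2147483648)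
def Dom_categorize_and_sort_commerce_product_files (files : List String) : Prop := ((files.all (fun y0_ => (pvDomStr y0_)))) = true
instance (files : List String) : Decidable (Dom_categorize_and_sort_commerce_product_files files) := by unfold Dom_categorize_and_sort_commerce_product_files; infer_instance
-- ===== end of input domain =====

-- B replaces A's per-group in-place sorts by one global sort of the input followed by a single
-- grouping pass over the sorted list (keys pre-registered in original order); same return value.

-- ===== PORT A =====
-- file_name.split('.') — sep "." ≠ "", so PySem.Str.split? is always `some` (exact)
def pvPartsA (s : String) : List String := (PySem.Str.split? s ".").getD []

def categorize_and_sort_commerce_product_files (files : List String) : List (String × List String) :=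
  let file_groups : PySem.Dict String (List String) :=
    files.foldl (fun d file_name =>
      match pvPartsA file_name with
      | _ :: category :: _ => d.modify category [] (fun v => v ++ [file_name])  -- defaultdict append
      | _ => d) PySem.Dict.empty
  let file_groups :=
    file_groups.keys.foldl (fun d category =>
      d.insert category (PySem.List.sorted (d.getD category []) (fun x => x) false)) file_groups
  file_groups.items

-- ===== PORT B =====
-- name.split('.') — sep "." ≠ "", so PySem.Str.split? is always `some` (exact)
def pvPartsB (s : String) : List String := (PySem.Str.split? s ".").getD []
def categorize_and_sort_commerce_product_files_alt (files : List String) : List (String × List String) :=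
  let groups : PySem.Dict String (List String) :=
    files.foldl (fun d name =>
      match pvPartsB name with
      | [] => d
      | [_] => d
      | _ :: cat :: _ => d.setdefault cat []) PySem.Dict.empty
  let groups :=
    (PySem.List.sorted files (fun x => x) false).foldl (fun d name =>
      match pvPartsB name with
      | [] => d
      | [_] => d
      | _ :: cat :: _ => d.modify cat [] (fun v => v ++ [name])) groups
  groups.items

-- ===== PRECONDITION & SPEC =====
def Spec_categorize_and_sort_commerce_product_files (files : List String) (out : List (String × List String)) : Prop := out = categorize_and_sort_commerce_product_files_alt files
instance (files : List String) (out : List (String × List String)) : Decidable (Spec_categorize_and_sort_commerce_product_files files out) := by unfold Spec_categorize_and_sort_commerce_product_files; infer_instance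

-- ===== CLAIM (what is proved, stated in full; the proofs are below) =====
def Claim_equal_categorize_and_sort_commerce_product_files : Prop := ∀ (files : List String), Dom_categorize_and_sort_commerce_product_files files → Spec_categorize_and_sort_commerce_product_files files (categorize_and_sort_commerce_product_files files)

-- ===== LEMMAS AND PROOFS =====

-- the (category, file) pair a file contributes, if any
def pvPair (f : String) : Option (String × String) :=
  match pvPartsA f with
  | _ :: c :: _ => some (c, f)
  | _ => none

-- membership test "file f falls in category k"
def pvIs (k : String) (f : String) : Bool :=
  match pvPartsA f with
  | _ :: c :: _ => c == k
  | _ => false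

-- a fold that branches on pvParts is a fold over the contributed pairs
theorem pv_fold_match (g : PySem.Dict String (List String) → String → String → PySem.Dict String (List String))
    (l : List String) (d : PySem.Dict String (List String)) :
    l.foldl (fun d f =>
      match pvPartsA f with
      | _ :: c :: _ => g d c f
      | _ => d) d
    = (l.filterMap pvPair).foldl (fun d p => g d p.1 p.2) d := by
  induction l generalizing d with
  | nil => rfl
  | cons f t ih =>
    rcases h : pvPartsA f with _ | ⟨a, _ | ⟨c, r⟩⟩
    · have hp : pvPair f = none := by simp [pvPair, h]
      simp only [List.foldl_cons, List.filterMap_cons, hp, h]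
      exact ih d
    · have hp : pvPair f = none := by simp [pvPair, h]
      simp only [List.foldl_cons, List.filterMap_cons, hp, h]
      exact ih d
    · have hp : pvPair f = some (c, f) := by simp [pvPair, h]
      simp only [List.foldl_cons, List.filterMap_cons, hp, h]
      exact ih (g d c f)

theorem pv_filter_pairs (k : String) (l : List String) :
    (((l.filterMap pvPair).filter (fun p => p.1 == k)).map (fun p => p.2)) = l.filter (pvIs k) := by
  induction l with
  | nil => rfl
  | cons f t ih =>
    rcases h : pvPartsA f with _ | ⟨a, _ | ⟨c, r⟩⟩
    · have hp : pvPair f = none := by simp [pvPair, h]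
      have hi : pvIs k f = false := by simp [pvIs, h]
      simp only [List.filterMap_cons, hp, List.filter_cons, hi]
      simpa using ih
    · have hp : pvPair f = none := by simp [pvPair, h]
      have hi : pvIs k f = false := by simp [pvIs, h]
      simp only [List.filterMap_cons, hp, List.filter_cons, hi]
      simpa using ih
    · have hp : pvPair f = some (c, f) := by simp [pvPair, h]
      have hi : pvIs k f = (c == k) := by simp [pvIs, h]
      simp only [List.filterMap_cons, hp, List.filter_cons, hi]
      by_cases hc : c = k <;> simp [hc, ih]

theorem pv_update_of_subset (l : List String) (s : PySem.Set String) (h : ∀ x ∈ l, x ∈ s) :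
    PySem.Set.update s l = s := by
  induction l generalizing s with
  | nil => rfl
  | cons x t ih =>
    have : PySem.Set.add s x = s := PySem.Set.add_of_mem (h x (by simp))
    simp only [PySem.Set.update, List.foldl_cons] at *
    rw [this, ih s (fun y hy => h y (by simp [hy]))]

theorem pv_setdefault_keys (ps : List (String × String)) (d : PySem.Dict String (List String)) :
    (ps.foldl (fun d p => d.setdefault p.1 ([] : List String)) d).keys
      = PySem.Set.update d.keys (ps.map (fun p => p.1)) := by
  induction ps generalizing d with
  | nil => rfl
  | cons p t ih =>
    simp only [List.foldl_cons, List.map_cons, PySem.Set.update, List.foldl_cons] at *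
    rw [ih, PySem.Dict.keys_setdefault, PySem.Set.add_eq_ite]
    by_cases h : p.1 ∈ d.keys
    · simp [h, (PySem.Dict.contains_iff_mem_keys d p.1).2 h]
    · cases hb : d.contains p.1 with
      | true => exact absurd ((PySem.Dict.contains_iff_mem_keys d p.1).1 hb) h
      | false => simp [h]

theorem pv_setdefault_getD (ps : List (String × String)) (d : PySem.Dict String (List String)) (k : String) :
    (ps.foldl (fun d p => d.setdefault p.1 ([] : List String)) d).getD k []
      = d.getD k [] := by
  induction ps generalizing d with
  | nil => rfl
  | cons p t ih =>
    simp only [List.foldl_cons]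
    rw [ih]
    by_cases h : k = p.1
    · subst h; exact PySem.Dict.getD_setdefault_self d p.1 [] []
    · show ((d.setdefault p.1 []).get? k).getD [] = (d.get? k).getD []
      rw [PySem.Dict.get?_setdefault_of_ne d [] h]

-- A's second loop: sort each existing value in place
theorem pv_phase2_getD (ks : List String) (d : PySem.Dict String (List String)) (hnd : ks.Nodup) (k : String) :
    (ks.foldl (fun d c => d.insert c (PySem.List.sorted (d.getD c []) (fun x => x) false)) d).getD k []
      = if k ∈ ks then PySem.List.sorted (d.getD k []) (fun x => x) false else d.getD k [] := by
  induction ks generalizing d with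
  | nil => simp
  | cons c t ih =>
    simp only [List.foldl_cons]
    rw [ih _ hnd.of_cons]
    by_cases hk : k ∈ t
    · have hne : k ≠ c := fun h => (List.nodup_cons.1 hnd).1 (h ▸ hk)
      simp [hk, PySem.Dict.getD_insert, hne]
    · by_cases hkc : k = c
      · subst hkc; simp [hk]
      · simp [hk, hkc, PySem.Dict.getD_insert]

-- sorting a category's members = taking that category's members of the globally sorted list
theorem pv_sorted_filter (k : String) (files : List String) :
    PySem.List.sorted (files.filter (pvIs k)) (fun x => x) false
      = (PySem.List.sorted files (fun x => x) false).filter (pvIs k) := by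
  apply PySem.List.sorted_id_eq_of_perm_of_pairwise
  · exact (PySem.List.sorted_perm files (fun x => x) false).filter _
  · exact (PySem.List.sorted_pairwise files (fun x => x)).filter _

theorem categorize_eq (files : List String) :
    categorize_and_sort_commerce_product_files files
      = categorize_and_sort_commerce_product_files_alt files := by
  unfold categorize_and_sort_commerce_product_files categorize_and_sort_commerce_product_files_alt
  have hB1 : (fun (d : PySem.Dict String (List String)) name =>
      match pvPartsB name with
      | [] => d
      | [_] => d
      | _ :: cat :: _ => d.setdefault cat []) = (fun d f =>
      match pvPartsA f with
      | _ :: c :: _ => d.setdefault c ([] : List String)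
      | _ => d) := by
    funext d f
    rcases h : pvPartsB f with _ | ⟨a, _ | ⟨c, r⟩⟩ <;> simp [show pvPartsA f = _ from h]
  have hB2 : (fun (d : PySem.Dict String (List String)) name =>
      match pvPartsB name with
      | [] => d
      | [_] => d
      | _ :: cat :: _ => d.modify cat [] (fun v => v ++ [name])) = (fun d f =>
      match pvPartsA f with
      | _ :: c :: _ => d.modify c [] (fun v => v ++ [f])
      | _ => d) := by
    funext d f
    rcases h : pvPartsB f with _ | ⟨a, _ | ⟨c, r⟩⟩ <;> simp [show pvPartsA f = _ from h]
  rw [hB1, hB2]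
  simp only [pv_fold_match (g := fun d c f => PySem.Dict.modify d c [] (fun v => v ++ [f])),
             pv_fold_match (g := fun d c _ => PySem.Dict.setdefault d c ([] : List String))]
  set pairs := files.filterMap pvPair with hpairs
  set pairsS := (PySem.List.sorted files (fun x => x) false).filterMap pvPair with hpairsS
  -- the A-side first dict
  set dA := pairs.foldl (fun d p => d.modify p.1 [] (fun v => v ++ [p.2])) PySem.Dict.empty with hdA
  have hkA : dA.keys = PySem.Set.update ([] : PySem.Set String) (pairs.map (fun p => p.1)) := by
    rw [hdA, PySem.Dict.keys_foldl_modify_key pairs (fun p => p.1) [] (fun _ p => (fun v => v ++ [p.2]))]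
    simp [PySem.Dict.keys_empty]
  have hndA : dA.keys.Nodup := by
    rw [hkA]; exact PySem.Set.nodup_update _ _ (List.nodup_nil)
  have hgA : ∀ k, dA.getD k [] = (pairs.filter (fun p => p.1 == k)).map (fun p => p.2) := by
    intro k
    rw [hdA, PySem.Dict.getD_foldl_modify_append, PySem.Dict.getD_empty]
    simp
  -- the B-side first dict
  set dB0 := pairs.foldl (fun d p => d.setdefault p.1 ([] : List String)) PySem.Dict.empty with hdB0
  have hkB0 : dB0.keys = dA.keys := by
    rw [hdB0, pv_setdefault_keys, PySem.Dict.keys_empty, hkA]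
  have hgB0 : ∀ k, dB0.getD k [] = [] := by
    intro k; rw [hdB0, pv_setdefault_getD, PySem.Dict.getD_empty]
  -- every category occurring in the sorted list already occurs in the original
  have hsub : ∀ c ∈ pairsS.map (fun p => p.1), c ∈ pairs.map (fun p => p.1) := by
    intro c hc
    have hp : (pairsS.map (fun p => p.1)).Perm (pairs.map (fun p => p.1)) :=
      (((PySem.List.sorted_perm files (fun x => x) false).filterMap pvPair).map _)
    exact hp.mem_iff.1 hc
  -- the final dicts
  set dAf := dA.keys.foldl (fun d c => d.insert c (PySem.List.sorted (d.getD c []) (fun x => x) false)) dA with hdAf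
  set dBf := pairsS.foldl (fun d p => d.modify p.1 [] (fun v => v ++ [p.2])) dB0 with hdBf
  have hkAf : dAf.keys = dA.keys := by
    rw [hdAf, PySem.Dict.keys_foldl_insert]
    exact pv_update_of_subset _ _ (fun x hx => hx)
  have hkBf : dBf.keys = dA.keys := by
    rw [hdBf, PySem.Dict.keys_foldl_modify_key pairsS (fun p => p.1) [] (fun _ p => (fun v => v ++ [p.2])), hkB0]
    exact pv_update_of_subset _ _
      (fun x hx => by rw [hkA]; simpa [PySem.Set.mem_update] using hsub x hx)
  have hgAf : ∀ k ∈ dA.keys, dAf.getD k [] = PySem.List.sorted (dA.getD k []) (fun x => x) false := by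
    intro k hk
    rw [hdAf, pv_phase2_getD _ _ hndA]
    simp [hk]
  have hgBf : ∀ k, dBf.getD k [] = (pairsS.filter (fun p => p.1 == k)).map (fun p => p.2) := by
    intro k
    rw [hdBf, PySem.Dict.getD_foldl_modify_append, hgB0]
    simp
  have hndAf : dAf.keys.Nodup := hkAf ▸ hndA
  have hndBf : dBf.keys.Nodup := hkBf ▸ hndA
  rw [PySem.Dict.items_eq_map_keys dAf hndAf [], PySem.Dict.items_eq_map_keys dBf hndBf [], hkAf, hkBf]
  apply List.map_congr_left
  intro k hk
  rw [hgAf k hk, hgBf k, hgA k, pv_filter_pairs, pv_filter_pairs, pv_sorted_filter]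

-- ===== VERDICT (by name: the statement is the Claim_ definition above) =====
theorem categorize_and_sort_commerce_product_files_spec : Claim_equal_categorize_and_sort_commerce_product_files := by
  intro files _
  unfold Spec_categorize_and_sort_commerce_product_files
  exact categorize_eq files
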